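-- pv_equiv track=rewrite | github.com/Hk4Fun/algorithm_offer | target_offer/28_2_字符串的组合.py | Combination3
-- ===== SOURCE A (Python) =====
-- import itertools
--
-- def Combination3(string):
--     if not string:
--         return None
--     result = []
--     for i in range(1, len(string) + 1):
--         iter = itertools.combinations(string, i)
--         result += list(map(''.join, list(iter)))
--     return sorted(list(set(result)))
-- ===== SOURCE B (Python) =====
-- def Combination3(string):
--     if not string:
--         return None
--     subs = set()
--     for mask in range(1, 1 << len(string)):
--         chars = []
--         m = mask
--         for ch in string:
--             if m & 1:
--                 chars.append(ch)
--             m >>= 1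
--         subs.add(''.join(chars))
--     return sorted(subs)
-- ===== Notes on version B (the rewrite author's own statement) =====
-- stated objective: alternative
-- what changed: Replaces the per-length itertools.combinations passes and a final list(set(...)) dedup with a single loop over bitmasks 1..2^n-1 that builds each subsequence directly into a set.
import Mathlib
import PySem

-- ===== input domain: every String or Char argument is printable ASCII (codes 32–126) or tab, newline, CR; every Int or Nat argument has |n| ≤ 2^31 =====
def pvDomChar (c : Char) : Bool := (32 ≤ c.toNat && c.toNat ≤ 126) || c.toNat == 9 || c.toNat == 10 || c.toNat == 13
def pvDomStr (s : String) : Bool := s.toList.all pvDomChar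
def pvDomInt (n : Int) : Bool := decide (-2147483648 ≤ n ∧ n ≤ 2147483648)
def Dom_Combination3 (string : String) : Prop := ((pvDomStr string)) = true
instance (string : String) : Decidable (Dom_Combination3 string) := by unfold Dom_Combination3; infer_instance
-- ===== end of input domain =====

-- B enumerates all nonempty subsequences by a single bitmask loop into a set
-- instead of A's per-length itertools.combinations passes with a final dedup;
-- objective: alternative (same cost, genuinely different traversal).

-- ===== PORT A =====
-- itertools.combinations(cs, k), joined order exactly as itertools emits them
def combosA : List Char → Nat → List (List Char)
  | _, 0 => [[]]
  | [], _ + 1 => []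
  | c :: cs, k + 1 => (combosA cs k).map (fun t => c :: t) ++ combosA cs (k + 1)

def Combination3 (string : String) : Option (List String) :=
  let cs := string.toList
  if cs = [] then none
  else
    -- for i in range(1, len(string)+1): result += map(''.join, combinations(string, i))
    let result := (List.range cs.length).foldl
      (fun acc i => acc ++ (combosA cs (i + 1)).map (fun t => String.mk t)) []
    -- sorted(list(set(result)))
    some (PySem.List.sorted (PySem.Set.ofList result) (fun x => x) false)

-- ===== PORT B =====
-- inner loop of Source B: walk the string, taking chars at the set bits of m (ascending)
def pickB : List Char → Nat → List Char
  | [], _ => []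
  | c :: cs, m => (if m % 2 = 1 then [c] else []) ++ pickB cs (m / 2)

def Combination3_alt (string : String) : Option (List String) :=
  let cs := string.toList
  if cs = [] then none
  else
    -- for mask in range(1, 1 << len(string)): subs.add(''.join(picked chars))
    let subs := (List.range (2 ^ cs.length - 1)).foldl
      (fun s m => PySem.Set.add s (String.mk (pickB cs (m + 1)))) PySem.Set.empty
    some (PySem.List.sorted subs (fun x => x) false)

-- ===== PRECONDITION & SPEC =====
def Spec_Combination3 (string : String) (out : Option (List String)) : Prop := out = Combination3_alt string
instance (string : String) (out : Option (List String)) : Decidable (Spec_Combination3 string out) := by unfold Spec_Combination3; infer_instance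

-- ===== CLAIM (what is proved, stated in full; the proofs are below) =====
def Claim_equal_Combination3 : Prop := ∀ (string : String), Dom_Combination3 string → Spec_Combination3 string (Combination3 string)

-- ===== LEMMAS AND PROOFS =====

-- A-side characterisation: membership in combinations of length k
lemma mem_combosA (cs : List Char) (k : Nat) (t : List Char) :
    t ∈ combosA cs k ↔ t.Sublist cs ∧ t.length = k := by
  induction cs generalizing k t with
  | nil =>
    cases k with
    | zero => simp [combosA, List.sublist_nil]
    | succ k =>
      simp only [combosA, List.not_mem_nil, false_iff]
      rintro ⟨hs, hl⟩
      rw [List.sublist_nil] at hs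
      simp [hs] at hl
  | cons c cs ih =>
    cases k with
    | zero =>
      simp only [combosA, List.mem_singleton, List.length_eq_zero_iff]
      constructor
      · rintro rfl; exact ⟨List.nil_sublist _, rfl⟩
      · rintro ⟨_, rfl⟩; rfl
    | succ k =>
      simp only [combosA, List.mem_append, List.mem_map, ih]
      constructor
      · rintro (⟨u, ⟨hs, hl⟩, rfl⟩ | ⟨hs, hl⟩)
        · exact ⟨List.Sublist.cons₂ c hs, by simp [hl]⟩
        · exact ⟨hs.cons c, hl⟩
      · rintro ⟨hs, hl⟩
        cases t with
        | nil => simp at hl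
        | cons x u =>
          rcases List.cons_sublist_cons'.mp (by exact hs) with h | ⟨rfl, h⟩
          · exact Or.inr ⟨h, hl⟩
          · exact Or.inl ⟨u, ⟨h, by simpa using hl⟩, rfl⟩

lemma pickB_sublist (cs : List Char) (m : Nat) : (pickB cs m).Sublist cs := by
  induction cs generalizing m with
  | nil => simp [pickB]
  | cons c cs ih =>
    simp only [pickB]
    split
    · exact (ih _).cons₂ c
    · exact (ih _).cons c

lemma pickB_zero (cs : List Char) : pickB cs 0 = [] := by
  induction cs with
  | nil => rfl
  | cons c cs ih => simp [pickB, ih]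

lemma pickB_ne_nil (cs : List Char) (m : Nat) (h1 : 1 ≤ m) (h2 : m < 2 ^ cs.length) :
    pickB cs m ≠ [] := by
  induction cs generalizing m with
  | nil => simp at h2; omega
  | cons c cs ih =>
    simp only [pickB]
    by_cases hm : m % 2 = 1
    · simp [hm]
    · have hm0 : m % 2 = 0 := by omega
      simp only [hm, if_neg (by omega : ¬ m % 2 = 1), List.nil_append]
      exact ih (m / 2) (by omega) (by
        simp [List.length_cons, pow_succ] at h2; omega)

lemma pickB_surj (cs t : List Char) (h : t.Sublist cs) :
    ∃ m, m < 2 ^ cs.length ∧ pickB cs m = t := by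
  induction h with
  | slnil => exact ⟨0, by simp [pickB]⟩
  | @cons t cs c _ ih =>
    obtain ⟨m, hm, hp⟩ := ih
    refine ⟨2 * m, ?_, ?_⟩
    · simp [List.length_cons, pow_succ]; omega
    · simp [pickB, Nat.mul_mod_right, Nat.mul_div_cancel_left m (by norm_num : 0 < 2), hp]
  | @cons₂ t cs c _ ih =>
    obtain ⟨m, hm, hp⟩ := ih
    refine ⟨2 * m + 1, ?_, ?_⟩
    · simp [List.length_cons, pow_succ]; omega
    · have : (2 * m + 1) / 2 = m := by omega
      simp [pickB, Nat.mul_add_mod, this, hp]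

-- membership in A's accumulated result list
lemma mem_resultA (cs : List Char) (x : String) :
    x ∈ (List.range cs.length).foldl
        (fun acc i => acc ++ (combosA cs (i + 1)).map (fun t => String.mk t)) [] ↔
      ∃ t : List Char, t.Sublist cs ∧ t ≠ [] ∧ x = String.mk t := by
  rw [PySem.List.foldl_append_eq_flatMap]
  simp only [List.nil_append, List.mem_flatMap, List.mem_range, List.mem_map, mem_combosA]
  constructor
  · rintro ⟨i, hi, t, ⟨hs, hl⟩, rfl⟩
    exact ⟨t, hs, by intro h; simp [h] at hl, rfl⟩
  · rintro ⟨t, hs, hne, rfl⟩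
    have hlen : t.length ≤ cs.length := hs.length_le
    have hpos : 1 ≤ t.length := by cases t <;> simp_all
    exact ⟨t.length - 1, by omega, t, ⟨hs, by omega⟩, rfl⟩

-- membership in B's generated list of strings
lemma mem_resultB (cs : List Char) (x : String) :
    x ∈ (List.range (2 ^ cs.length - 1)).map (fun m => String.mk (pickB cs (m + 1))) ↔
      ∃ t : List Char, t.Sublist cs ∧ t ≠ [] ∧ x = String.mk t := by
  simp only [List.mem_map, List.mem_range]
  constructor
  · rintro ⟨m, hm, rfl⟩
    exact ⟨pickB cs (m + 1), pickB_sublist cs (m + 1),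
      pickB_ne_nil cs (m + 1) (by omega) (by have := Nat.one_le_two_pow (n := cs.length); omega), rfl⟩
  · rintro ⟨t, hs, hne, rfl⟩
    obtain ⟨m, hm, hp⟩ := pickB_surj cs t hs
    have hm0 : m ≠ 0 := by
      rintro rfl; exact hne (hp ▸ pickB_zero cs)
    exact ⟨m - 1, by omega, by rw [Nat.sub_add_cancel (by omega)]; exact hp ▸ rfl⟩

lemma foldl_add_eq_ofList (cs : List Char) :
    (List.range (2 ^ cs.length - 1)).foldl
        (fun s m => PySem.Set.add s (String.mk (pickB cs (m + 1)))) PySem.Set.empty =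
      PySem.Set.ofList ((List.range (2 ^ cs.length - 1)).map (fun m => String.mk (pickB cs (m + 1)))) := by
  rw [PySem.Set.ofList_eq_foldl, List.foldl_map]
  rfl

-- ===== VERDICT (by name: the statement is the Claim_ definition above) =====
theorem Combination3_spec : Claim_equal_Combination3 := by
  intro string _
  unfold Spec_Combination3 Combination3 Combination3_alt
  simp only
  by_cases h : string.toList = []
  · simp [h]
  · simp only [h, if_neg (by exact h)]
    rw [foldl_add_eq_ofList]
    have hperm := (List.perm_ext_iff_of_nodup (PySem.Set.nodup_ofList (xs := (List.range string.toList.length).foldl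
        (fun acc i => acc ++ (combosA string.toList (i + 1)).map (fun t => String.mk t)) []))
      (PySem.Set.nodup_ofList (xs := (List.range (2 ^ string.toList.length - 1)).map
        (fun m => String.mk (pickB string.toList (m + 1)))))).mpr
      (fun x => by rw [PySem.Set.mem_ofList, PySem.Set.mem_ofList, mem_resultA, mem_resultB])
    exact congrArg some (PySem.List.sorted_eq_sorted_of_perm _ _ _ (fun a b hab => hab) hperm)
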